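-- pv_equiv track=rewrite | github.com/rpzbass/Python | verifica_comando.py | verificar_comando
-- ===== SOURCE A (Python) =====
-- def verificar_comando(comando):
--
--     caracteres_suspeitos = [';','&','|','$']
--
--     for caractere_suspeito in caracteres_suspeitos:
--
--         if caractere_suspeito in comando:
--             return 'Comando Suspeito'
--             break
--     else:
--         return 'Comando Seguro'
-- ===== SOURCE B (Python) =====
-- def verificar_comando(comando):
--     suspeitos = {';', '&', '|', '$'}
--     for c in comando:
--         if c in suspeitos:
--             return 'Comando Suspeito'
--     return 'Comando Seguro'
-- ===== Notes on version B (the rewrite author's own statement) =====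
-- stated objective: idiomatic
-- what changed: B scans the command's characters once against a set of suspicious characters, instead of A's loop over the pattern list with a substring scan of the whole command per pattern.
import Mathlib
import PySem

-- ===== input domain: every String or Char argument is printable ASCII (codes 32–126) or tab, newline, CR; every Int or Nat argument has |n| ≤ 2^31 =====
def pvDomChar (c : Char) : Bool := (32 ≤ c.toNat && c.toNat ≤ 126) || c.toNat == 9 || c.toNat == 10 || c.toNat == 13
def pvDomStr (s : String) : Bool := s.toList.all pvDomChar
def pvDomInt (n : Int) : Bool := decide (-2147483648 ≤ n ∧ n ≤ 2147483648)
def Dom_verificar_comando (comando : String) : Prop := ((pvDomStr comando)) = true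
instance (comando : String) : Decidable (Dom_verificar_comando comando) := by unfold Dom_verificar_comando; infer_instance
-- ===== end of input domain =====

-- B scans the command's characters once against a set of suspicious characters instead of
-- A's per-pattern substring scans; same return value everywhere (idiomatic rewrite).

-- ===== PORT A =====
-- A loops over the fixed pattern list, testing 'caractere_suspeito in comando' each time.
def verificar_comando_goA (comando : String) : List String → String
  | [] => "Comando Seguro"
  | p :: rest =>
      if PySem.Str.isIn p comando then "Comando Suspeito"
      else verificar_comando_goA comando rest

def verificar_comando (comando : String) : String :=
  verificar_comando_goA comando [";", "&", "|", "$"]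

-- ===== PORT B =====
-- B loops over the command's characters, testing membership in the suspicious-char set.
def verificar_comando_suspeitos : List Char := PySem.Set.ofList [';', '&', '|', '$']

def verificar_comando_goB : List Char → String
  | [] => "Comando Seguro"
  | c :: rest =>
      if PySem.Set.contains verificar_comando_suspeitos c then "Comando Suspeito"
      else verificar_comando_goB rest

def verificar_comando_alt (comando : String) : String :=
  verificar_comando_goB comando.toList

-- ===== PRECONDITION & SPEC =====
def Spec_verificar_comando (comando : String) (out : String) : Prop := out = verificar_comando_alt comando
instance (comando : String) (out : String) : Decidable (Spec_verificar_comando comando out) := by unfold Spec_verificar_comando; infer_instance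

-- ===== CLAIM (what is proved, stated in full; the proofs are below) =====
def Claim_equal_verificar_comando : Prop := ∀ (comando : String), Dom_verificar_comando comando → Spec_verificar_comando comando (verificar_comando comando)

-- ===== LEMMAS AND PROOFS =====

theorem singleton_infix_iff {a : Char} {l : List Char} : [a] <:+: l ↔ a ∈ l := by
  constructor
  · intro h
    exact h.subset (List.mem_singleton_self a)
  · intro h
    obtain ⟨s, t, rfl⟩ := List.append_of_mem h
    exact ⟨s, t, by simp⟩

theorem goB_eq (cs : List Char) :
    verificar_comando_goB cs =
      if cs.any (fun c => c ∈ verificar_comando_suspeitos) then "Comando Suspeito"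
      else "Comando Seguro" := by
  induction cs with
  | nil => simp [verificar_comando_goB]
  | cons c rest ih =>
      rw [verificar_comando_goB, ih, List.any_cons]
      cases hb : PySem.Set.contains verificar_comando_suspeitos c <;>
        simp_all [PySem.Set.contains_eq_listContains]

theorem isIn_single (c : Char) (s : String) :
    PySem.Str.isIn (String.ofList [c]) s = true ↔ c ∈ s.toList := by
  rw [show PySem.Str.isIn (String.ofList [c]) s = PySem.Chars.isIn [c] s.toList from by
        simp [PySem.Str.isIn_eq]]
  rw [PySem.Chars.isIn_iff_infix, singleton_infix_iff]

theorem goA_eq (comando : String) (ps : List String) :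
    verificar_comando_goA comando ps =
      if ps.any (fun p => PySem.Str.isIn p comando) then "Comando Suspeito"
      else "Comando Seguro" := by
  induction ps with
  | nil => simp [verificar_comando_goA]
  | cons p rest ih =>
      rw [verificar_comando_goA, ih, List.any_cons]
      cases hb : PySem.Str.isIn p comando <;> simp_all

theorem conds_eq (comando : String) :
    ([";", "&", "|", "$"] : List String).any (fun p => PySem.Str.isIn p comando) =
      comando.toList.any (fun c => c ∈ verificar_comando_suspeitos) := by
  rw [Bool.eq_iff_iff, List.any_eq_true, List.any_eq_true]
  constructor
  · rintro ⟨p, hp, hin⟩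
    fin_cases hp
    · exact ⟨';', by simpa using (isIn_single ';' comando).mp (by simpa using hin),
        by simp [verificar_comando_suspeitos, PySem.Set.mem_ofList]⟩
    · exact ⟨'&', by simpa using (isIn_single '&' comando).mp (by simpa using hin),
        by simp [verificar_comando_suspeitos, PySem.Set.mem_ofList]⟩
    · exact ⟨'|', by simpa using (isIn_single '|' comando).mp (by simpa using hin),
        by simp [verificar_comando_suspeitos, PySem.Set.mem_ofList]⟩
    · exact ⟨'$', by simpa using (isIn_single '$' comando).mp (by simpa using hin),
        by simp [verificar_comando_suspeitos, PySem.Set.mem_ofList]⟩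
  · rintro ⟨c, hc, hs⟩
    have hs' : c ∈ ([';', '&', '|', '$'] : List Char) := by
      simpa [verificar_comando_suspeitos, PySem.Set.mem_ofList] using hs
    fin_cases hs'
    · exact ⟨";", by simp, by simpa using (isIn_single ';' comando).mpr hc⟩
    · exact ⟨"&", by simp, by simpa using (isIn_single '&' comando).mpr hc⟩
    · exact ⟨"|", by simp, by simpa using (isIn_single '|' comando).mpr hc⟩
    · exact ⟨"$", by simp, by simpa using (isIn_single '$' comando).mpr hc⟩

-- ===== VERDICT (by name: the statement is the Claim_ definition above) =====
theorem verificar_comando_spec : Claim_equal_verificar_comando := by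
  unfold Claim_equal_verificar_comando
  intro comando _
  unfold Spec_verificar_comando
  show verificar_comando comando = verificar_comando_alt comando
  unfold verificar_comando verificar_comando_alt
  rw [goA_eq, goB_eq, conds_eq]
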